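-- pv_equiv track=rewrite | github.com/TessFerrandez/AdventOfCode-Python | 2020/day19.py | is_valid_p2
-- ===== SOURCE A (Python) =====
-- from typing import List, Set
--
-- def is_valid_p2(string: str, rule_42: Set[str], rule_31: Set[str]) -> bool:
--     """
--     0: 8 11
--     8: 42 | 42 8
--     11: 42 31 | 42 11 31
--     ---------------------------------------------------------------------------
--     everything can be expressed in 42 (A) and 31 (B)
--     8: (A)+ ex. A AA AAA AAAA...
--     11: (A)x(B)x with equal amounts of A and B and x > 0 ex. AB AABB AAABBB...
--     0: (A)+(A)x(B)x
--     ---------------------------------------------------------------------------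
--     A = set(42) and B = set(31) are completely different and len(A) = len(B) = 8
--     """
--     num_b = 0
--     while string != '' and string[-8:] in rule_31:
--         string = string[:-8]
--         num_b += 1
--
--     if num_b == 0:
--         return False
--
--     num_a = 0
--     while string != '' and string[-8:] in rule_42:
--         string = string[:-8]
--         num_a += 1
--
--     if string != '':
--         return False
--     if num_a < num_b + 1:
--         return False
--
--     return True
-- ===== SOURCE B (Python) =====
-- def is_valid_p2(string, rule_42, rule_31):
--     # classify-then-validate: chunk the string end-aligned into 8-char pieces
--     # (short piece first), count the trailing run of rule_31 chunks, then
--     # require every remaining chunk to be in rule_42 and the counts to fit.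
--     r = len(string) % 8
--     chunks = [string[:r]] if r else []
--     i = r
--     while i < len(string):
--         chunks.append(string[i:i + 8])
--         i += 8
--     num_b = 0
--     for chunk in reversed(chunks):
--         if chunk in rule_31:
--             num_b += 1
--         else:
--             break
--     if num_b == 0:
--         return False
--     rest = chunks[:len(chunks) - num_b]
--     if any(chunk not in rule_42 for chunk in rest):
--         return False
--     return len(rest) >= num_b + 1
-- ===== Notes on version B (the rewrite author's own statement) =====
-- stated objective: alternative
-- what changed: Replaces the two interleaved suffix-peeling while loops (repeated string slicing) with a single end-aligned chunking pass followed by a structural check of the chunk list: count the trailing rule_31 run, verify the remaining chunks are all in rule_42, and compare the counts.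
import Mathlib
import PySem

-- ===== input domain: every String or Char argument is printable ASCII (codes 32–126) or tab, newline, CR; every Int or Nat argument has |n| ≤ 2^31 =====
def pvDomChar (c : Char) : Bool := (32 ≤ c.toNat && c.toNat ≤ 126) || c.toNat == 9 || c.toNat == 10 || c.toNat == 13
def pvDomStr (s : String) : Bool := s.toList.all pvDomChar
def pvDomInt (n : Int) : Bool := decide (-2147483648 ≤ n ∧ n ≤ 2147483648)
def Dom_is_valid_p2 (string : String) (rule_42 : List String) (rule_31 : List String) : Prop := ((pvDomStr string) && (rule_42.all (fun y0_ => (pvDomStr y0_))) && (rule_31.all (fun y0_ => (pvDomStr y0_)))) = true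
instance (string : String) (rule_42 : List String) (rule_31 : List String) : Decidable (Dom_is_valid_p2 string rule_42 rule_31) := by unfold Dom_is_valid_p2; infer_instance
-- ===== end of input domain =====

-- B replaces A's two interleaved suffix-peeling while loops by a single end-aligned
-- chunking pass followed by a structural check of the chunk list (objective: alternative).

-- ===== PORT A =====
-- the shared shape of A's two while loops: peel the 8-char suffix while it is in `rule`
def peelLoop (rule : List (List Char)) (s : List Char) (num : Nat) : Nat × List Char :=
  if s ≠ [] ∧ PySem.List.slice s (some (-8)) none ∈ rule then
    peelLoop rule (PySem.List.slice s none (some (-8))) (num + 1)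
  else (num, s)
termination_by s.length
decreasing_by
  rw [PySem.List.slice_to_neg_ofNat s 8 (by omega)]
  have : s.length ≠ 0 := by
    rename_i h; exact fun h0 => h.1 (List.eq_nil_of_length_eq_zero h0)
  simp [List.length_take]; omega

def is_valid_p2 (string : String) (rule_42 : List String) (rule_31 : List String) : Bool :=
  let r42 := rule_42.map String.toList
  let r31 := rule_31.map String.toList
  let p1 := peelLoop r31 string.toList 0
  if p1.1 = 0 then false
  else
    let p2 := peelLoop r42 p1.2 0
    if p2.2 ≠ [] then false
    else if p2.1 < p1.1 + 1 then false
    else true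

-- ===== PORT B =====
-- Source B's chunking while loop: appends string[i:i+8] for i = r, r+8, …
def chunkLoop (s : List Char) (i : Nat) : List (List Char) :=
  if i < s.length then
    PySem.List.slice s (some (i : Int)) (some ((i : Int) + 8)) :: chunkLoop s (i + 8)
  else []
termination_by s.length - i

-- Source B's for/break loop counting the leading run of `rule` members (applied to chunks.reverse)
def countRun (rule : List (List Char)) : List (List Char) → Nat
  | [] => 0
  | c :: t => if rule.contains c then countRun rule t + 1 else 0

def is_valid_p2_alt (string : String) (rule_42 : List String) (rule_31 : List String) : Bool :=
  let s := string.toList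
  let r42 := rule_42.map String.toList
  let r31 := rule_31.map String.toList
  let r := s.length % 8
  let chunks := (if r ≠ 0 then [PySem.List.slice s none (some (r : Int))] else []) ++ chunkLoop s r
  let num_b := countRun r31 chunks.reverse
  if num_b = 0 then false
  else
    let rest := chunks.take (chunks.length - num_b)
    if rest.any (fun c => !(r42.contains c)) then false
    else decide (num_b + 1 ≤ rest.length)

-- ===== PRECONDITION & SPEC =====
def Spec_is_valid_p2 (string : String) (rule_42 : List String) (rule_31 : List String) (out : Bool) : Prop := out = is_valid_p2_alt string rule_42 rule_31
instance (string : String) (rule_42 : List String) (rule_31 : List String) (out : Bool) : Decidable (Spec_is_valid_p2 string rule_42 rule_31 out) := by unfold Spec_is_valid_p2; infer_instance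

-- ===== CLAIM (what is proved, stated in full; the proofs are below) =====
def Claim_equal_is_valid_p2 : Prop := ∀ (string : String) (rule_42 : List String) (rule_31 : List String), Dom_is_valid_p2 string rule_42 rule_31 → Spec_is_valid_p2 string rule_42 rule_31 (is_valid_p2 string rule_42 rule_31)

-- ===== LEMMAS AND PROOFS =====

-- reference end-aligned chunking, recursive from the back (mirrors A's peeling steps)
def CE (s : List Char) : List (List Char) :=
  if h : s = [] then [] else CE (s.take (s.length - 8)) ++ [s.drop (s.length - 8)]
termination_by s.length
decreasing_by
  have : s.length ≠ 0 := fun h0 => h (List.eq_nil_of_length_eq_zero h0)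
  simp [List.length_take]; omega

theorem flatten_CE (s : List Char) : (CE s).flatten = s := by
  fun_induction CE s with
  | case1 => simp
  | case2 s hne ih => simp [ih]

theorem CE_mem_ne_nil (s : List Char) (c : List Char) (hc : c ∈ CE s) : c ≠ [] := by
  fun_induction CE s with
  | case1 => simp at hc
  | case2 s hne ih =>
    rcases List.mem_append.1 hc with h1 | h1
    · exact ih h1
    · simp at h1
      subst h1
      simp [List.drop_eq_nil_iff]
      have : s.length ≠ 0 := fun h0 => hne (List.eq_nil_of_length_eq_zero h0)
      omega

theorem slice_i8 (s : List Char) (i : Nat) :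
    PySem.List.slice s (some (i : Int)) (some ((i : Int) + 8)) = (s.drop i).take 8 := by
  have h8 : ((8 : Nat) : Int) = (8 : Int) := by norm_num
  rw [← h8, PySem.List.slice_natCast_add]

theorem chunkLoop_step_aux (s : List Char) (k : Nat) : ∀ i, i < s.length → s.length - i = 8 * (k + 1) →
    chunkLoop s i = chunkLoop (s.take (s.length - 8)) i ++ [s.drop (s.length - 8)] := by
  induction k with
  | zero =>
    intro i hi hk
    rw [chunkLoop]
    conv_rhs => rw [chunkLoop]
    have hlen : s.length - 8 = i := by omega
    have h1 : ¬ i < (s.take (s.length - 8)).length := by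
      simp [List.length_take]; omega
    rw [if_pos hi, if_neg h1, chunkLoop, if_neg (by omega : ¬ i + 8 < s.length)]
    rw [slice_i8, hlen]
    have : (s.drop i).length = 8 := by simp; omega
    rw [List.take_of_length_le (by omega)]
    simp
  | succ k ih =>
    intro i hi hk
    rw [chunkLoop]
    conv_rhs => rw [chunkLoop]
    have h1 : i < (s.take (s.length - 8)).length := by
      simp [List.length_take]; omega
    rw [if_pos hi, if_pos h1]
    rw [ih (i + 8) (by omega) (by omega)]
    simp only [List.cons_append]
    congr 1
    rw [slice_i8, slice_i8, List.drop_take, List.take_take]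
    congr 1
    omega

theorem CE_eq_front (s : List Char) :
    CE s = (if s.length % 8 ≠ 0 then [s.take (s.length % 8)] else []) ++ chunkLoop s (s.length % 8) := by
  fun_induction CE s with
  | case1 => simp [chunkLoop]
  | case2 s hne ih =>
    have hn : s.length ≠ 0 := fun h0 => hne (List.eq_nil_of_length_eq_zero h0)
    by_cases h8 : s.length ≤ 8
    · have ht : s.length - 8 = 0 := by omega
      rw [ht, List.take_zero, List.drop_zero]
      rw [show CE ([] : List Char) = [] from by rw [CE]; simp]
      simp only [List.nil_append]
      by_cases hlt : s.length < 8
      · have hr : s.length % 8 = s.length := Nat.mod_eq_of_lt hlt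
        rw [hr, if_pos hn, chunkLoop, if_neg (by omega)]
        simp
      · have he : s.length = 8 := by omega
        have hr : s.length % 8 = 0 := by omega
        rw [hr]
        simp only [ne_eq, not_true_eq_false, if_false, List.nil_append]
        rw [chunkLoop, if_pos (by omega), chunkLoop, if_neg (by omega), slice_i8]
        simp only [List.drop_zero]
        rw [List.take_of_length_le (by omega)]
    · have hlen' : (s.take (s.length - 8)).length = s.length - 8 := by
        simp [List.length_take]
      have hr' : (s.take (s.length - 8)).length % 8 = s.length % 8 := by
        rw [hlen']; omega
      rw [ih, hr']
      have hrlt : s.length % 8 < s.length := by omega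
      conv_rhs => rw [chunkLoop_step_aux s ((s.length - (s.length % 8)) / 8 - 1) (s.length % 8) hrlt (by omega)]
      have htt : (s.take (s.length - 8)).take (s.length % 8) = s.take (s.length % 8) := by
        rw [List.take_take]
        congr 1
        omega
      rw [htt, List.append_assoc]

theorem countRun_le (rule : List (List Char)) (l : List (List Char)) : countRun rule l ≤ l.length := by
  induction l with
  | nil => simp [countRun]
  | cons c t ih => simp [countRun]; split <;> simp <;> omega

theorem countRun_eq_length_iff (rule : List (List Char)) (l : List (List Char)) :
    countRun rule l = l.length ↔ ∀ c ∈ l, c ∈ rule := by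
  induction l with
  | nil => simp [countRun]
  | cons c t ih =>
    simp only [countRun, List.length_cons, List.mem_cons]
    split
    · rename_i hc
      rw [Nat.add_right_cancel_iff, ih]
      constructor
      · intro h x hx; rcases hx with rfl | hx
        · exact List.contains_iff_mem.mp hc
        · exact h x hx
      · intro h x hx; exact h x (Or.inr hx)
    · rename_i hc
      have hcm : c ∉ rule := fun hm => hc (List.contains_iff_mem.mpr hm)
      constructor
      · intro h; exact absurd h (by omega)
      · intro h; exact absurd (h c (Or.inl rfl)) hcm

theorem CE_nil : CE ([] : List Char) = [] := by rw [CE]; simp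

theorem CE_cons (s : List Char) (h : s ≠ []) :
    CE s = CE (s.take (s.length - 8)) ++ [s.drop (s.length - 8)] := by
  rw [CE]; simp [h]

theorem peelLoop_spec (rule : List (List Char)) (s : List Char) (num : Nat) :
    peelLoop rule s num =
      (num + countRun rule (CE s).reverse,
       ((CE s).take ((CE s).length - countRun rule (CE s).reverse)).flatten) := by
  fun_induction peelLoop rule s num with
  | case1 s num h ih =>
    rw [PySem.List.slice_to_neg_ofNat s 8 (by omega)]
    rw [PySem.List.slice_to_neg_ofNat s 8 (by omega)] at ih
    have hmem := h.2
    rw [PySem.List.slice_from_neg_ofNat s 8 (by omega)] at hmem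
    rw [CE_cons s h.1]
    have hrev : (CE (s.take (s.length - 8)) ++ [s.drop (s.length - 8)]).reverse
        = s.drop (s.length - 8) :: (CE (s.take (s.length - 8))).reverse := by simp
    rw [hrev]
    rw [show countRun rule (s.drop (s.length - 8) :: (CE (s.take (s.length - 8))).reverse)
        = countRun rule (CE (s.take (s.length - 8))).reverse + 1 from by
      rw [countRun, if_pos (List.contains_iff_mem.mpr hmem)]]
    have hle : (CE (s.take (s.length - 8))).length -
        countRun rule (CE (s.take (s.length - 8))).reverse ≤ (CE (s.take (s.length - 8))).length := by omega
    rw [ih]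
    simp only [Prod.mk.injEq]
    refine ⟨by omega, ?_⟩
    simp only [List.length_append, List.length_cons, List.length_nil]
    rw [show (CE (s.take (s.length - 8))).length + (0 + 1) -
          (countRun rule (CE (s.take (s.length - 8))).reverse + 1)
          = (CE (s.take (s.length - 8))).length -
            countRun rule (CE (s.take (s.length - 8))).reverse from by omega]
    rw [List.take_append_of_le_length hle]
  | case2 s num h =>
    by_cases hs : s = []
    · subst hs
      simp [CE_nil, countRun]
    · have hmem : s.drop (s.length - 8) ∉ rule := by
        intro hm
        exact h ⟨hs, by rw [PySem.List.slice_from_neg_ofNat s 8 (by omega)]; exact hm⟩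
      rw [CE_cons s hs]
      have hrev : (CE (s.take (s.length - 8)) ++ [s.drop (s.length - 8)]).reverse
          = s.drop (s.length - 8) :: (CE (s.take (s.length - 8))).reverse := by simp
      rw [hrev, show countRun rule (s.drop (s.length - 8) :: (CE (s.take (s.length - 8))).reverse) = 0 from by
        rw [countRun, if_neg (fun hc => hmem (List.contains_iff_mem.mp hc))]]
      rw [Nat.sub_zero, Nat.add_zero, List.take_of_length_le (le_refl _), ← CE_cons s hs, flatten_CE]

theorem CE_flatten_take (s : List Char) : ∀ k, CE (((CE s).take k).flatten) = (CE s).take k := by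
  fun_induction CE s with
  | case1 => intro k; simp [CE_nil]
  | case2 s hne ih =>
    intro k
    by_cases hk : k ≤ (CE (s.take (s.length - 8))).length
    · rw [List.take_append_of_le_length hk]
      exact ih k
    · rw [List.take_of_length_le (by simp; omega), ← CE_cons s hne, flatten_CE, CE_cons s hne]

theorem a_eq_b (string : String) (rule_42 : List String) (rule_31 : List String) :
    is_valid_p2 string rule_42 rule_31 = is_valid_p2_alt string rule_42 rule_31 := by
  simp only [is_valid_p2, is_valid_p2_alt]
  have hchunks : (if string.toList.length % 8 ≠ 0 then
      [PySem.List.slice string.toList none (some ((string.toList.length % 8 : Nat) : Int))] else [])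
      ++ chunkLoop string.toList (string.toList.length % 8) = CE string.toList := by
    rw [PySem.List.slice_to_natCast, ← CE_eq_front]
  rw [hchunks]
  rw [peelLoop_spec (rule_31.map String.toList) string.toList 0, Nat.zero_add]
  set tb := countRun (rule_31.map String.toList) (CE string.toList).reverse with htb
  by_cases h0 : tb = 0
  · simp [h0]
  · rw [if_neg h0, if_neg h0]
    set rest := (CE string.toList).take ((CE string.toList).length - tb) with hrest
    rw [peelLoop_spec (rule_42.map String.toList) rest.flatten 0, Nat.zero_add]
    rw [CE_flatten_take string.toList ((CE string.toList).length - tb)]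
    simp only [← hrest]
    set ta := countRun (rule_42.map String.toList) rest.reverse with hta
    by_cases hall : ∀ c ∈ rest, c ∈ (rule_42.map String.toList)
    · have htaeq : ta = rest.length := by
        rw [hta, ← (List.length_reverse : rest.reverse.length = rest.length), countRun_eq_length_iff]
        intro c hc; exact hall c (List.mem_reverse.mp hc)
      have hanyf : (rest.any fun c => !(List.map String.toList rule_42).contains c) = false := by
        rw [List.any_eq_false]
        intro c hc hcon
        rw [Bool.not_eq_true'] at hcon
        rw [List.contains_iff_mem.mpr (hall c hc)] at hcon
        simp at hcon
      rw [hanyf, htaeq, Nat.sub_self, List.take_zero]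
      simp only [List.flatten_nil, ne_eq, not_true_eq_false, if_false]
      by_cases hc : rest.length < tb + 1
      · rw [if_pos hc]
        simp; omega
      · rw [if_neg hc]
        simp; omega
    · push_neg at hall
      obtain ⟨c, hcmem, hcnot⟩ := hall
      have hany : (rest.any fun x => !(List.map String.toList rule_42).contains x) = true := by
        simp only [List.any_eq_true]
        refine ⟨c, hcmem, ?_⟩
        simp only [Bool.not_eq_eq_eq_not, Bool.not_true]
        exact Bool.eq_false_iff.mpr (fun hc2 => hcnot (List.contains_iff_mem.mp hc2))
      have htalt : ta < rest.length := by
        have h1 : ta ≤ rest.length := by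
          rw [hta, ← (List.length_reverse : rest.reverse.length = rest.length)]
          exact countRun_le _ _
        rcases Nat.lt_or_ge ta rest.length with h | h
        · exact h
        · exfalso
          have : ta = rest.length := by omega
          rw [hta, ← (List.length_reverse : rest.reverse.length = rest.length), countRun_eq_length_iff] at this
          exact hcnot (this c (List.mem_reverse.mpr hcmem))
      have hflat : (rest.take (rest.length - ta)).flatten ≠ [] := by
        intro hfl
        rw [List.flatten_eq_nil_iff] at hfl
        have hne : rest.take (rest.length - ta) ≠ [] := by
          rw [ne_eq, List.take_eq_nil_iff]
          push_neg
          constructor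
          · omega
          · intro h; rw [h] at hcmem; simp at hcmem
        obtain ⟨x, hx⟩ := List.exists_mem_of_ne_nil _ hne
        have hxr : x ∈ rest := List.mem_of_mem_take hx
        have hxc : x ∈ CE string.toList := List.mem_of_mem_take (hrest ▸ hxr)
        exact CE_mem_ne_nil _ x hxc (hfl x hx)
      rw [if_pos hflat, if_pos hany]

-- ===== VERDICT (by name: the statement is the Claim_ definition above) =====
theorem is_valid_p2_spec : Claim_equal_is_valid_p2 := by
  intro string rule_42 rule_31 _
  unfold Spec_is_valid_p2
  exact a_eq_b string rule_42 rule_31
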